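-- pv_equiv track=rewrite | github.com/Lakyn80/Kunstkabinett_Public | backend/app/api/v1/routes_profile.py | _mask_postal
-- ===== SOURCE A (Python) =====
-- from typing import Optional
--
-- def _mask_postal(value: Optional[str]) -> Optional[str]:
--     if not value:
--         return None
--     s = str(value)
--     digits = [c for c in s if c.isdigit()]
--     if not digits:
--         return None
--     keep = 2
--     out = []
--     to_keep = keep
--     for ch in reversed(s):
--         if ch.isdigit():
--             if to_keep > 0:
--                 out.append(ch)
--                 to_keep -= 1
--             else:
--                 out.append("*")
--         else:
--             out.append(ch)
--     return "".join(reversed(out))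
-- ===== SOURCE B (Python) =====
-- from typing import Optional
--
-- def _mask_postal(value: Optional[str]) -> Optional[str]:
--     if not value:
--         return None
--     s = str(value)
--     pos = [i for i, c in enumerate(s) if c.isdigit()]
--     if not pos:
--         return None
--     cut = pos[-2] if len(pos) >= 2 else pos[0]
--     return "".join("*" if c.isdigit() and i < cut else c for i, c in enumerate(s))
-- ===== Notes on version B (the rewrite author's own statement) =====
-- stated objective: alternative
-- what changed: B first collects the index positions of all digits, picks the cutoff index of the second-to-last digit (or the only digit), and then masks exactly the digits whose index is below that cutoff in one map over the enumerated string, instead of A's reversed scan with a keep-countdown followed by a re-reversal.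
import Mathlib
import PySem

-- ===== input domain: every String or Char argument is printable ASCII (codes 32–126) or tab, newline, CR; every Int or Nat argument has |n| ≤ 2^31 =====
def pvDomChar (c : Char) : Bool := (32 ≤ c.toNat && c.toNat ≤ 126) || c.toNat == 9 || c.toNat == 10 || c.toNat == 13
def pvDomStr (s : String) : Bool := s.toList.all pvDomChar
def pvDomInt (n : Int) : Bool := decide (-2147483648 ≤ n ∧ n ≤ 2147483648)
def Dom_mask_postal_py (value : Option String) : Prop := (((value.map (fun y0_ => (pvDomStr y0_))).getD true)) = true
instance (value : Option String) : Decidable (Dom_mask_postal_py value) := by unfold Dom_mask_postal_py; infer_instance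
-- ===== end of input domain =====

-- B collects the digit positions, takes the cutoff position of the second-to-last digit
-- and masks digits strictly before it in one forward map; A scans the reversed string
-- with a keep-countdown and reverses back. Same O(n) cost, different algorithmic shape.

-- ===== PORT A =====
def mask_postal_py (value : Option String) : Option String :=
  match value with
  | none => none
  | some s =>
    if s = "" then none
    else
      let cs := s.toList
      let digits := cs.filter (fun c => PySem.Chars.isdigit c)
      if digits.isEmpty then none
      else
        let r := cs.reverse.foldl
          (fun (st : List Char × Int) ch =>
            if PySem.Chars.isdigit ch then
              if st.2 > 0 then (st.1 ++ [ch], st.2 - 1)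
              else (st.1 ++ ['*'], st.2)
            else (st.1 ++ [ch], st.2))
          ([], 2)
        some (String.ofList r.1.reverse)

-- ===== PORT B =====
def mask_postal_py_alt (value : Option String) : Option String :=
  match value with
  | none => none
  | some s =>
    if s = "" then none
    else
      let cs := s.toList
      let pos := (PySem.List.enumerate cs).filterMap
        (fun p => if PySem.Chars.isdigit p.2 then some p.1 else none)
      if pos.isEmpty then none
      else
        let cut := if pos.length ≥ 2 then pos.getD (pos.length - 2) 0 else pos.getD 0 0
        some (String.ofList ((PySem.List.enumerate cs).map
          (fun p => if PySem.Chars.isdigit p.2 && decide (p.1 < cut) then '*' else p.2)))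

-- ===== PRECONDITION & SPEC =====
def Spec_mask_postal_py (value : Option String) (out : Option String) : Prop := out = mask_postal_py_alt value
instance (value : Option String) (out : Option String) : Decidable (Spec_mask_postal_py value out) := by unfold Spec_mask_postal_py; infer_instance

-- ===== CLAIM =====
def Claim_equal_mask_postal_py : Prop := ∀ (value : Option String), Dom_mask_postal_py value → Spec_mask_postal_py value (mask_postal_py value)

-- ===== LEMMAS AND PROOFS =====

-- pvA l t : A's loop read left-to-right over the REVERSED string (keep the first t digits seen, mask the rest)
def pvA : List Char → Int → List Char
  | [], _ => []
  | c :: l, t =>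
    if PySem.Chars.isdigit c then
      if t > 0 then c :: pvA l (t - 1) else '*' :: pvA l t
    else c :: pvA l t

-- pvB l m : mask the first m digits of l, keep the rest
def pvB : List Char → Nat → List Char
  | [], _ => []
  | c :: l, m =>
    if PySem.Chars.isdigit c then
      if 0 < m then '*' :: pvB l (m - 1) else c :: pvB l m
    else c :: pvB l m

-- pvPos j l : the (offset-j) index positions of the digits of l
def pvPos : Int → List Char → List Int
  | _, [] => []
  | j, c :: l => if PySem.Chars.isdigit c then j :: pvPos (j + 1) l else pvPos (j + 1) l

lemma pvA_append (xs ys : List Char) (t : Int) (ht : 0 ≤ t) :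
    pvA (xs ++ ys) t
      = pvA xs t ++ pvA ys (t - min t (xs.countP (fun c => PySem.Chars.isdigit c))) := by
  induction xs generalizing t with
  | nil =>
    simp only [List.nil_append, pvA, List.countP_nil, Nat.cast_zero]
    have : t - min t 0 = t := by omega
    rw [this]
  | cons c xs ih =>
    rw [List.cons_append]
    by_cases hc : PySem.Chars.isdigit c
    · have hcc : ((c :: xs).countP (fun c => PySem.Chars.isdigit c) : Int)
          = (xs.countP (fun c => PySem.Chars.isdigit c) : Int) + 1 := by
        rw [List.countP_cons]; simp [hc]
      by_cases htp : t > 0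
      · simp only [pvA, hc, if_true, htp, ih (t - 1) (by omega), List.cons_append, hcc]
        have : t - 1 - min (t - 1) (xs.countP (fun c => PySem.Chars.isdigit c))
            = t - min t ((xs.countP (fun c => PySem.Chars.isdigit c) : Int) + 1) := by omega
        rw [this]
      · have ht0 : t = 0 := by omega
        subst ht0
        simp only [pvA, hc, if_true, htp, if_false, ih 0 le_rfl, List.cons_append, hcc]
        have : (0:Int) - min (0:Int) ((xs.countP (fun c => PySem.Chars.isdigit c) : Nat) : Int)
            = 0 - min (0:Int) (((xs.countP (fun c => PySem.Chars.isdigit c) : Nat) : Int) + 1) := by omega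
        rw [this]
    · have hcc : ((c :: xs).countP (fun c => PySem.Chars.isdigit c) : Int)
          = (xs.countP (fun c => PySem.Chars.isdigit c) : Int) := by
        rw [List.countP_cons]; simp [hc]
      simp [pvA, hc, ih t ht]

lemma pvA_reverse (l : List Char) (t : Int) (ht : 0 ≤ t) :
    (pvA l.reverse t).reverse
      = pvB l (l.countP (fun c => PySem.Chars.isdigit c) - t.toNat) := by
  induction l with
  | nil => simp [pvA, pvB]
  | cons c l ih =>
    have hcnt : l.reverse.countP (fun c => PySem.Chars.isdigit c)
        = l.countP (fun c => PySem.Chars.isdigit c) := List.countP_reverse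
    rw [List.reverse_cons, pvA_append l.reverse [c] t ht, hcnt, List.reverse_append, ih]
    set d := l.countP (fun c => PySem.Chars.isdigit c) with hd
    set r : Int := t - min t (d : Int) with hr
    by_cases hc : PySem.Chars.isdigit c
    · have hcc : (c :: l).countP (fun c => PySem.Chars.isdigit c) = d + 1 := by
        rw [List.countP_cons]; simp [hc, hd]
      rw [hcc]
      by_cases hrp : r > 0
      · have hsing : pvA [c] r = [c] := by simp [pvA, hc, hrp]
        have hnm : ¬ 0 < d + 1 - t.toNat := by omega
        rw [hsing]
        simp only [pvB, hc, if_true, List.reverse_cons, List.reverse_nil,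
          List.nil_append, List.singleton_append]
        rw [if_neg hnm]
        have : d + 1 - t.toNat = d - t.toNat := by omega
        rw [this]
      · have hsing : pvA [c] r = ['*'] := by simp [pvA, hc, hrp]
        have hm : 0 < d + 1 - t.toNat := by omega
        rw [hsing]
        simp only [pvB, hc, if_true, List.reverse_cons, List.reverse_nil,
          List.nil_append, List.singleton_append]
        rw [if_pos hm]
        have : d + 1 - t.toNat - 1 = d - t.toNat := by omega
        rw [this]
    · have hcc : (c :: l).countP (fun c => PySem.Chars.isdigit c) = d := by
        rw [List.countP_cons]; simp [hc, hd]
      rw [hcc]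
      have hsing : pvA [c] r = [c] := by simp [pvA, hc]
      rw [hsing]
      simp [pvB, hc]

lemma foldA_spec (l : List Char) (acc : List Char) (t : Int) :
    (l.foldl
      (fun (st : List Char × Int) ch =>
        if PySem.Chars.isdigit ch then
          if st.2 > 0 then (st.1 ++ [ch], st.2 - 1)
          else (st.1 ++ ['*'], st.2)
        else (st.1 ++ [ch], st.2))
      (acc, t)).1 = acc ++ pvA l t := by
  induction l generalizing acc t with
  | nil => simp [pvA]
  | cons c l ih =>
    by_cases hc : PySem.Chars.isdigit c
    · by_cases htp : t > 0
      · simp [List.foldl_cons, hc, htp, ih, pvA]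
      · simp [List.foldl_cons, hc, htp, ih, pvA]
    · simp [List.foldl_cons, hc, ih, pvA]

-- the port's filterMap over the enumerated list computes pvPos
lemma filterMap_enum_eq_pvPos (l : List Char) (j : Int) :
    (PySem.List.enumerate l j).filterMap
        (fun p => if PySem.Chars.isdigit p.2 then some p.1 else none)
      = pvPos j l := by
  induction l generalizing j with
  | nil => simp [PySem.List.enumerate_nil, pvPos]
  | cons c l ih =>
    rw [PySem.List.enumerate_cons, List.filterMap_cons]
    by_cases hc : PySem.Chars.isdigit c
    · simp [hc, pvPos, ih]
    · simp [hc, pvPos, ih]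

lemma pvPos_length (l : List Char) (j : Int) :
    (pvPos j l).length = l.countP (fun c => PySem.Chars.isdigit c) := by
  induction l generalizing j with
  | nil => simp [pvPos]
  | cons c l ih =>
    by_cases hc : PySem.Chars.isdigit c
    · simp [pvPos, hc, ih]
    · simp [pvPos, hc, ih]

lemma pvPos_ge (l : List Char) (j : Int) : ∀ x ∈ pvPos j l, j ≤ x := by
  induction l generalizing j with
  | nil => simp [pvPos]
  | cons c l ih =>
    intro x hx
    by_cases hc : PySem.Chars.isdigit c
    · simp only [pvPos, hc, if_true, List.mem_cons] at hx
      rcases hx with h | h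
      · omega
      · have := ih (j + 1) x h; omega
    · simp only [pvPos, hc] at hx
      have := ih (j + 1) x hx; omega

lemma mask_keep (l : List Char) (j cut : Int) (h : cut ≤ j) :
    (PySem.List.enumerate l j).map
        (fun p => if PySem.Chars.isdigit p.2 && decide (p.1 < cut) then '*' else p.2)
      = l := by
  induction l generalizing j with
  | nil => simp [PySem.List.enumerate_nil]
  | cons c l ih =>
    rw [PySem.List.enumerate_cons, List.map_cons]
    have hlt : ¬ (j < cut) := by omega
    simp only [hlt, decide_false, Bool.and_false, Bool.false_eq_true, if_false]
    rw [ih (j + 1) (by omega)]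

lemma pvB_zero (l : List Char) : pvB l 0 = l := by
  induction l with
  | nil => rfl
  | cons c l ih => by_cases hc : PySem.Chars.isdigit c <;> simp [pvB, hc, ih]

-- masking digits before the k-th digit position = masking the first k digits
lemma mask_cut_eq_pvB (l : List Char) (j : Int) (k : Nat) (hk : k < (pvPos j l).length) :
    (PySem.List.enumerate l j).map
        (fun p => if PySem.Chars.isdigit p.2 && decide (p.1 < (pvPos j l).getD k 0) then '*' else p.2)
      = pvB l k := by
  induction l generalizing j k with
  | nil => simp [pvPos] at hk
  | cons c l ih =>
    rw [PySem.List.enumerate_cons, List.map_cons]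
    by_cases hc : PySem.Chars.isdigit c
    · have hp : pvPos j (c :: l) = j :: pvPos (j + 1) l := by simp [pvPos, hc]
      rw [hp] at hk ⊢
      match k with
      | 0 =>
        have hcut : (j :: pvPos (j + 1) l).getD 0 0 = j := rfl
        rw [hcut]
        have hlt : ¬ (j < j) := by omega
        simp only [hc, hlt, decide_false, Bool.and_false, Bool.false_eq_true, if_false]
        rw [mask_keep l (j + 1) j (by omega)]
        simp [pvB, hc, pvB_zero]
      | k + 1 =>
        have hk' : k < (pvPos (j + 1) l).length := by simpa using hk
        have hcut : (j :: pvPos (j + 1) l).getD (k + 1) 0 = (pvPos (j + 1) l).getD k 0 := rfl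
        rw [hcut]
        have hmem : (pvPos (j + 1) l).getD k 0 ∈ pvPos (j + 1) l := by
          rw [List.getD_eq_getElem _ _ hk']
          exact List.getElem_mem hk'
        have hge : j + 1 ≤ (pvPos (j + 1) l).getD k 0 := pvPos_ge l (j + 1) _ hmem
        have hlt : j < (pvPos (j + 1) l).getD k 0 := by omega
        simp only [hc, hlt, decide_true, Bool.and_true, if_true]
        rw [ih (j + 1) k hk']
        simp [pvB, hc]
    · have hp : pvPos j (c :: l) = pvPos (j + 1) l := by simp [pvPos, hc]
      rw [hp] at hk ⊢
      simp only [hc, Bool.false_and, Bool.false_eq_true, if_false]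
      rw [ih (j + 1) k hk]
      simp [pvB, hc]

-- ===== VERDICT =====
theorem mask_postal_py_spec : Claim_equal_mask_postal_py := by
  intro value _hdom
  unfold Spec_mask_postal_py
  match value with
  | none => rfl
  | some s =>
    simp only [mask_postal_py, mask_postal_py_alt]
    by_cases hs : s = ""
    · simp [hs]
    · simp only [hs, if_false]
      set cs := s.toList with hcs
      set d := cs.countP (fun c => PySem.Chars.isdigit c) with hdd
      have hfilter : (cs.filter (fun c => PySem.Chars.isdigit c)).isEmpty = (d == 0) := by
        rw [hdd, List.countP_eq_length_filter]
        cases h : (cs.filter (fun c => PySem.Chars.isdigit c)) <;> simp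
      have hposlen : ((PySem.List.enumerate cs 0).filterMap
          (fun p => if PySem.Chars.isdigit p.2 then some p.1 else none)).length = d := by
        rw [filterMap_enum_eq_pvPos, pvPos_length, hdd]
      have hposE : ((PySem.List.enumerate cs 0).filterMap
            (fun p => if PySem.Chars.isdigit p.2 then some p.1 else none)).isEmpty = (d == 0) := by
        rw [← hposlen]
        generalize ((PySem.List.enumerate cs 0).filterMap
            (fun p => if PySem.Chars.isdigit p.2 then some p.1 else none)) = xs
        cases xs <;> simp
      by_cases hd0 : d = 0
      · simp [hfilter, hposE, hd0]
      · simp only [hfilter, hposE, hd0, beq_iff_eq, if_false]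
        rw [foldA_spec, List.nil_append, pvA_reverse cs 2 (by norm_num), ← hdd]
        rw [filterMap_enum_eq_pvPos]
        have hlen : (pvPos 0 cs).length = d := by rw [pvPos_length, hdd]
        have hcut : (if (pvPos 0 cs).length ≥ 2 then
              (pvPos 0 cs).getD ((pvPos 0 cs).length - 2) 0
            else (pvPos 0 cs).getD 0 0) = (pvPos 0 cs).getD (d - 2) 0 := by
          rw [hlen]
          by_cases h2 : d ≥ 2
          · rw [if_pos h2]
          · rw [if_neg h2]
            congr 1
            omega
        rw [hcut, mask_cut_eq_pvB cs 0 (d - 2) (by rw [hlen]; omega)]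
        have h2t : (2:Int).toNat = 2 := rfl
        rw [h2t]
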